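-- pv_equiv track=rewrite | github.com/Pooky112/Baekjoon | 프로그래머스/0/181855. 문자열 묶기/문자열 묶기.py | solution
-- ===== SOURCE A (Python) =====
-- def solution(strArr):
--     answer = {}
--     for s in strArr:
--         if len(s) in answer:
--             answer[len(s)] += 1
--         else:
--             answer[len(s)] = 1
--     return max(answer.values())
-- ===== SOURCE B (Python) =====
-- def solution(strArr):
--     lengths = sorted(len(s) for s in strArr)
--     best = 0
--     i = 0
--     n = len(lengths)
--     while i < n:
--         j = i
--         while j < n and lengths[j] == lengths[i]:
--             j += 1
--         best = max(best, j - i)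
--         i = j
--     return best
-- ===== Notes on version B (the rewrite author's own statement) =====
-- stated objective: alternative
-- what changed: B sorts the list of lengths and scans maximal runs of equal values in one pass, instead of accumulating per-length counts in a dict and taking max of its values.
import Mathlib
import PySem

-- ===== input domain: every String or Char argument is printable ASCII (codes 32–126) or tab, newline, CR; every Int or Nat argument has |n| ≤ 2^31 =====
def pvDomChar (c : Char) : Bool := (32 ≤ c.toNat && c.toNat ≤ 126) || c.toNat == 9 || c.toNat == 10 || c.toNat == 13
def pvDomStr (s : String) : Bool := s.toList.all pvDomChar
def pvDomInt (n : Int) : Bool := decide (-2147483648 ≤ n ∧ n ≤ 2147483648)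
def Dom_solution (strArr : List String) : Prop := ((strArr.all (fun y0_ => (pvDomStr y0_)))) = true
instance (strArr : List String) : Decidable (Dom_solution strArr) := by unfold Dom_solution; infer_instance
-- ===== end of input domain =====

-- B sorts the lengths and scans maximal runs in one pass instead of a dict of counts (alternative decomposition, same result).

-- ===== PORT A =====
-- literal port of A: build a dict length -> count with an if-in branch, then max of its values
-- (the `none` branch of the match is Python's ValueError on an empty dict; Pre_solution excludes it)
def solution (strArr : List String) : Int :=
  let answer := strArr.foldl (fun d s =>
    if d.contains (PySem.Str.len s) then
      d.insert (PySem.Str.len s) (d.getD (PySem.Str.len s) 0 + 1)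
    else
      d.insert (PySem.Str.len s) 1) PySem.Dict.empty
  match PySem.List.max? answer.values (fun v => v) with
  | some v => v
  | none => 0

-- ===== PORT B =====
-- Source B's outer while loop: the inner while computes the length of the run at the front
-- (takeWhile), then jumps past it (dropWhile), keeping the best run length seen.
def runBest : List Int → Int → Int
  | [], best => best
  | x :: xs, best =>
    runBest ((x :: xs).dropWhile (fun y => y == x))
      (max best ((((x :: xs).takeWhile (fun y => y == x)).length : Nat) : Int))
  termination_by l => l.length
  decreasing_by
    simp only [List.dropWhile_cons, BEq.rfl, if_true]
    have h1 := List.length_dropWhile_le (fun y => y == x) xs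
    have h2 : (x :: xs).length = xs.length + 1 := by simp
    omega

def solution_alt (strArr : List String) : Int :=
  runBest (PySem.List.sorted (strArr.map (fun s => PySem.Str.len s)) (fun x => x) false) 0

-- ===== PRECONDITION & SPEC =====
-- Pre_ excludes only the empty list, on which A raises ValueError (max() of the empty dict's values).
def Pre_solution (strArr : List String) : Prop := strArr ≠ []
instance (strArr : List String) : Decidable (Pre_solution strArr) := by unfold Pre_solution; infer_instance
def pvWitness_solution : List String := ["a", "bc", "d"]

def Spec_solution (strArr : List String) (out : Int) : Prop := out = solution_alt strArr
instance (strArr : List String) (out : Int) : Decidable (Spec_solution strArr out) := by unfold Spec_solution; infer_instance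

-- ===== CLAIM (what is proved, stated in full; the proofs are below) =====
def Claim_equal_solution : Prop := ∀ (strArr : List String), Dom_solution strArr → Pre_solution strArr → Spec_solution strArr (solution strArr)

-- ===== LEMMAS AND PROOFS =====

-- A's if-in branch is exactly the "insert getD+1" counting step
lemma foldA_eq (L : List Int) : ∀ d : PySem.Dict Int Int,
    L.foldl (fun d x => if d.contains x then d.insert x (d.getD x 0 + 1) else d.insert x 1) d
      = L.foldl (fun d x => d.insert x (d.getD x 0 + 1)) d := by
  induction L with
  | nil => intro d; rfl
  | cons x xs ih =>
    intro d
    simp only [List.foldl_cons]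
    rw [ih]
    congr 1
    by_cases h : d.contains x = true
    · simp [h]
    · have h0 : d.getD x 0 = 0 := PySem.Dict.getD_of_not_contains d 0 (by simpa using h)
      simp [h, h0]

-- runBest over a (≤)-sorted list is the running max of the per-value counts over first occurrences
lemma head_dropWhile_false {p : Int → Bool} : ∀ (l : List Int) (a : Int) (l' : List Int),
    l.dropWhile p = a :: l' → p a = false := by
  intro l
  induction l with
  | nil => simp [List.dropWhile]
  | cons x xs ih =>
    intro a l' h
    by_cases hp : p x = true
    · rw [List.dropWhile_cons, if_pos hp] at h; exact ih _ _ h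
    · rw [List.dropWhile_cons, if_neg hp] at h
      cases h; simpa using hp

lemma eq_singleton_of_nodup (l : List Int) (x : Int) (hn : l.Nodup) (hm : ∀ y, y ∈ l ↔ y = x) :
    l = [x] := by
  cases l with
  | nil => exact absurd ((hm x).mpr rfl) (by simp)
  | cons a rest =>
    have hax : a = x := (hm a).mp (by simp)
    cases rest with
    | nil => simp [hax]
    | cons b rbs =>
      have hbx : b = x := (hm b).mp (by simp)
      exfalso
      have : a ≠ b := by simpa using (List.pairwise_cons.mp hn).1 b (by simp)
      exact this (hax.trans hbx.symm)

lemma runBest_spec : ∀ (n : Nat) (l : List Int), l.length ≤ n → l.Pairwise (· ≤ ·) → ∀ b : Int,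
    runBest l b = ((PySem.List.dedup l).map (fun v => ((l.count v : Nat) : Int))).foldl max b := by
  intro n
  induction n with
  | zero =>
    intro l hl _ b
    have hnil : l = [] := by cases l with | nil => rfl | cons a as => simp at hl
    subst hnil
    simp [runBest, PySem.List.dedup_eq_ofList, PySem.Set.ofList]
  | succ n ih =>
    intro l hl hp b
    match l with
    | [] => simp [runBest, PySem.List.dedup_eq_ofList, PySem.Set.ofList]
    | x :: xs =>
      have hpx : (fun y : Int => y == x) x = true := by simp
      have ht : (x :: xs).takeWhile (fun y => y == x) = x :: xs.takeWhile (fun y => y == x) := by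
        rw [List.takeWhile_cons, if_pos hpx]
      have hd : (x :: xs).dropWhile (fun y => y == x) = xs.dropWhile (fun y => y == x) := by
        rw [List.dropWhile_cons, if_pos hpx]
      set t := (x :: xs).takeWhile (fun y => y == x) with htdef
      set dr := (x :: xs).dropWhile (fun y => y == x) with hdrdef
      have hsplit : t ++ dr = x :: xs := List.takeWhile_append_dropWhile
      have hxle : ∀ y ∈ xs, x ≤ y := (List.pairwise_cons.mp hp).1
      have hdr_pair : dr.Pairwise (· ≤ ·) := hp.sublist (List.dropWhile_sublist _)
      -- every element of dr is strictly greater than x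
      have hgt : ∀ z ∈ dr, x < z := by
        intro z hz
        cases hdr : dr with
        | nil => rw [hdr] at hz; simp at hz
        | cons a l' =>
          have hpa : (fun y : Int => y == x) a = false := head_dropWhile_false (x :: xs) a l' (by rw [← hdrdef, hdr])
          have hane : a ≠ x := by simpa using hpa
          have hax : x < a := by
            have hamem : a ∈ xs := by
              have : a ∈ dr := by rw [hdr]; simp
              have hsub : dr.Sublist xs := hd ▸ List.dropWhile_sublist _
              exact hsub.mem this
            exact lt_of_le_of_ne (hxle a hamem) (Ne.symm hane)
          rw [hdr] at hz
          rcases List.mem_cons.mp hz with rfl | hz'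
          · exact hax
          · have := (List.pairwise_cons.mp (hdr ▸ hdr_pair)).1 z hz'
            exact lt_of_lt_of_le hax this
      have hne : ∀ z ∈ dr, z ≠ x := fun z hz => ne_of_gt (hgt z hz)
      -- counts
      have htall : ∀ y ∈ t, y = x := by
        intro y hy
        have := List.mem_takeWhile_imp (htdef ▸ hy)
        simpa using this
      have hcx : (x :: xs).count x = t.length := by
        rw [← hsplit, List.count_append]
        have h1 : t.count x = t.length := List.count_eq_length.mpr (fun b hb => (htall b hb).symm)
        have h2 : dr.count x = 0 := List.count_eq_zero.mpr (fun hmem => (hne x hmem) rfl)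
        omega
      have hcv : ∀ v ∈ dr, (x :: xs).count v = dr.count v := by
        intro v hv
        rw [← hsplit, List.count_append]
        have h1 : t.count v = 0 := List.count_eq_zero.mpr (by
          intro hmem
          exact (hne v hv) (htall v hmem))
        omega
      -- dedup splits at the first run
      have hded : PySem.List.dedup (x :: xs) = x :: PySem.List.dedup dr := by
        rw [PySem.List.dedup_eq_ofList, PySem.List.dedup_eq_ofList, ← hsplit, PySem.Set.ofList_append]
        have htx : PySem.Set.ofList t = [x] := by
          apply eq_singleton_of_nodup _ _ (PySem.Set.nodup_ofList t)
          intro y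
          rw [PySem.Set.mem_ofList]
          constructor
          · exact htall y
          · intro hy; subst hy; rw [ht]; simp
        rw [htx, PySem.Set.update_eq_append_filter]
        have hf : List.filter (fun y => !PySem.Set.contains [x] y) (PySem.Set.ofList dr) = PySem.Set.ofList dr := by
          rw [List.filter_eq_self]
          intro a ha
          have := hne a ((PySem.Set.mem_ofList dr a).mp ha)
          simp [PySem.Set.contains, this]
        rw [hf]
        rfl
      -- step runBest and use the IH on dr
      have hlen : dr.length ≤ n := by
        have h1 := List.length_dropWhile_le (fun y : Int => y == x) xs
        have h2 : (x :: xs).length = xs.length + 1 := by simp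
        rw [hd]
        omega
      rw [runBest, ← hdrdef, ← htdef, ih dr hlen hdr_pair, hded]
      simp only [List.map_cons, List.foldl_cons, hcx]
      congr 1
      apply List.map_congr_left
      intro v hv
      rw [hcv v ((PySem.List.mem_dedup dr v).mp hv)]

-- max over Int lists is invariant under permutation
lemma foldl_max_perm {l1 l2 : List Int} (h : l1.Perm l2) (a : Int) :
    l1.foldl max a = l2.foldl max a :=
  h.foldl_eq a

-- ===== VERDICT (by name: the statement is the Claim_ definition above) =====
theorem solution_spec : Claim_equal_solution := by
  intro strArr _hdom hpre
  unfold Spec_solution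
  set L := strArr.map (fun s => PySem.Str.len s) with hL
  have hLne : L ≠ [] := fun h => hpre (List.map_eq_nil_iff.mp (hL ▸ h))
  -- A's dict loop is the counter over the list of lengths; its values are the per-length counts
  have hA : solution strArr =
      match PySem.List.max? ((PySem.Set.ofList L).map (fun v => ((L.count v : Nat) : Int))) (fun v => v) with
      | some v => v
      | none => 0 := by
    simp only [solution]
    have hmap := List.foldl_map (f := fun s => PySem.Str.len s)
      (g := fun (d : PySem.Dict Int Int) x =>
        if d.contains x then d.insert x (d.getD x 0 + 1) else d.insert x 1)
      (l := strArr) (init := PySem.Dict.empty)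
    rw [← hL] at hmap
    rw [← hmap, foldA_eq, PySem.Dict.foldl_insert_getD_add_one_eq_counter]
    have hv : (PySem.Dict.counter L).values = (PySem.Set.ofList L).map (fun v => ((L.count v : Nat) : Int)) := by
      simp only [PySem.Dict.values, PySem.Dict.items_counter, List.map_map]
      rfl
    rw [hv]
  -- B's scan over the sorted lengths is the running max of the same counts
  set sl := PySem.List.sorted L (fun x => x) false with hsl
  have hperm : sl.Perm L := PySem.List.sorted_perm L (fun x => x) false
  have hsp : sl.Pairwise (· ≤ ·) := by simpa using PySem.List.sorted_pairwise L (fun x => x)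
  have hB : solution_alt strArr = ((PySem.List.dedup sl).map (fun v => ((sl.count v : Nat) : Int))).foldl max 0 := by
    simp only [solution_alt, ← hL, ← hsl]
    exact runBest_spec sl.length sl le_rfl hsp 0
  have hmapeq : (PySem.List.dedup sl).map (fun v => ((sl.count v : Nat) : Int))
      = (PySem.List.dedup sl).map (fun v => ((L.count v : Nat) : Int)) :=
    List.map_congr_left (fun v _ => by rw [hperm.count_eq])
  have hpermD : (PySem.List.dedup sl).Perm (PySem.Set.ofList L) :=
    (List.perm_ext_iff_of_nodup (PySem.List.nodup_dedup sl) (PySem.Set.nodup_ofList L)).mpr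
      (fun a => by rw [PySem.List.mem_dedup, PySem.Set.mem_ofList, hperm.mem_iff])
  obtain ⟨v, vs, hS⟩ : ∃ v vs, PySem.Set.ofList L = v :: vs := by
    cases hS' : PySem.Set.ofList L with
    | nil =>
      exfalso
      cases hL' : L with
      | nil => exact hLne hL'
      | cons a as =>
        have ha : a ∈ PySem.Set.ofList L := (PySem.Set.mem_ofList L a).mpr (by rw [hL']; simp)
        rw [hS'] at ha; simp at ha
    | cons v vs => exact ⟨v, vs, rfl⟩
  have hvL : v ∈ L := (PySem.Set.mem_ofList L v).mp (by rw [hS]; simp)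
  have hk0 : (0 : Int) ≤ ((L.count v : Nat) : Int) := by positivity
  rw [hA, hB, hmapeq]
  have hpermC : ((PySem.List.dedup sl).map (fun v => ((L.count v : Nat) : Int))).Perm
      ((PySem.Set.ofList L).map (fun v => ((L.count v : Nat) : Int))) := hpermD.map _
  rw [foldl_max_perm hpermC 0, hS]
  simp only [List.map_cons]
  rw [PySem.List.max?_id_cons]
  simp only [List.foldl_cons]
  rw [max_eq_right hk0]
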